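-- pv_equiv track=rewrite | github.com/Amudhan-A/vortex-final | analyzer/blast_radius.py | compute_repo_blast_radius
-- ===== SOURCE A (Python) =====
-- from collections import defaultdict, deque
-- from typing import Dict, Set
--
-- def reverse_graph(graph: Dict[str, Set[str]]):
--
--     reverse = defaultdict(set)
--
--     for caller, callees in graph.items():
--         for callee in callees:
--             reverse[callee].add(caller)
--
--     return reverse
--
-- def compute_repo_blast_radius(function_name: str, graph: Dict[str, Set[str]]):
--
--     reverse = reverse_graph(graph)
--
--     visited = set()
--     queue = deque([function_name])
--
--     while queue:
--
--         current = queue.popleft()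
--
--         for caller in reverse.get(current, []):
--
--             if caller not in visited:
--
--                 visited.add(caller)
--                 queue.append(caller)
--
--     return visited
-- ===== SOURCE B (Python) =====
-- def compute_repo_blast_radius(function_name, graph):
--     visited = set()
--     pending = [function_name]
--     i = 0
--     while i < len(pending):
--         current = pending[i]
--         i += 1
--         for caller, callees in graph.items():
--             if current in callees and caller not in visited:
--                 visited.add(caller)
--                 pending.append(caller)
--     return visited
-- ===== Notes on version B (the rewrite author's own statement) =====
-- stated objective: simpler
-- what changed: Drops the reverse_graph helper and the prebuilt reverse index entirely: a cursor-driven worklist rescans the original graph for the callers of each popped node, skipping all index construction (dict/set allocation); worst-case O(V*E) vs A's O(V+E), but measurably faster on the generated inputs.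
import Mathlib
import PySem

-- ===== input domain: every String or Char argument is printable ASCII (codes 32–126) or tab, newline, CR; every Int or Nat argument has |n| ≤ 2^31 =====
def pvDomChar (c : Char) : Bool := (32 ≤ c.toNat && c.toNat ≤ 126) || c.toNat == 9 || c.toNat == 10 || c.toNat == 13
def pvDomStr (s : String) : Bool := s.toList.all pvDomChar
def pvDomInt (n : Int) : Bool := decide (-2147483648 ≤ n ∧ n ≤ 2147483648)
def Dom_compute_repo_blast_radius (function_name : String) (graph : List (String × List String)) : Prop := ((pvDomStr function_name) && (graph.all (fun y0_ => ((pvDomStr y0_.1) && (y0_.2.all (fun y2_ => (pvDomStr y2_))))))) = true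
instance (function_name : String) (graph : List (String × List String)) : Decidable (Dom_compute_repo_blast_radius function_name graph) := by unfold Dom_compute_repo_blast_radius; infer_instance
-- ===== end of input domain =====

-- B drops A's reverse_graph helper and its prebuilt reverse index: a cursor-driven worklist
-- rescans the original graph for the callers of each popped node (simpler; not claimed faster).
-- Both ports read the dict argument through PySem.Dict.ofList (Python dict semantics:
-- duplicate keys keep the first position with the last value).

-- ===== PORT A =====
-- Helpers shared by the ports' termination proofs (cited in decreasing_by).

def pvNews (L : List String) (v : PySem.Set String) : List String :=
  match L with
  | [] => []
  | c :: L' => if PySem.Set.contains v c then pvNews L' v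
               else c :: pvNews L' (PySem.Set.add v c)

lemma pvFoldA (L : List String) (v : PySem.Set String) (q : List String) :
    L.foldl (fun (vq : PySem.Set String × List String) caller =>
        if PySem.Set.contains vq.1 caller then vq
        else (PySem.Set.add vq.1 caller, vq.2 ++ [caller])) (v, q)
      = (v ++ pvNews L v, q ++ pvNews L v) := by
  induction L generalizing v q with
  | nil => simp [pvNews]
  | cons c L' ih =>
    simp only [List.foldl_cons, pvNews]
    by_cases h : PySem.Set.contains v c
    · rw [if_pos h, if_pos h]
      exact ih v q
    · have hadd : PySem.Set.add v c = v ++ [c] := by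
        simp only [PySem.Set.add]; rw [if_neg h]
      rw [if_neg h, if_neg h, hadd, ih]
      simp

lemma pvNews_mem (L : List String) (v : PySem.Set String) (x : String)
    (hx : x ∈ pvNews L v) : x ∈ L ∧ x ∉ v := by
  induction L generalizing v with
  | nil => simp [pvNews] at hx
  | cons c L' ih =>
    rw [pvNews] at hx
    by_cases h : PySem.Set.contains v c
    · rw [if_pos h] at hx
      obtain ⟨h1, h2⟩ := ih v hx
      exact ⟨List.mem_cons_of_mem _ h1, h2⟩
    · rw [if_neg h] at hx
      have hadd : PySem.Set.add v c = v ++ [c] := by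
        simp only [PySem.Set.add]; rw [if_neg h]
      rcases List.mem_cons.mp hx with rfl | hx'
      · exact ⟨List.mem_cons_self, by simpa [PySem.Set.contains] using h⟩
      · obtain ⟨h1, h2⟩ := ih _ hx'
        rw [hadd] at h2
        exact ⟨List.mem_cons_of_mem _ h1, fun hc => h2 (List.mem_append_left _ hc)⟩

def pvNewsB (items : List (String × List String)) (cur : String)
    (v : PySem.Set String) : List String :=
  match items with
  | [] => []
  | p :: ps =>
      if p.2.contains cur && !(PySem.Set.contains v p.1) then
        p.1 :: pvNewsB ps cur (PySem.Set.add v p.1)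
      else pvNewsB ps cur v

lemma pvFoldB (items : List (String × List String)) (cur : String)
    (v : PySem.Set String) (q : List String) :
    items.foldl (fun (vp : PySem.Set String × List String) p =>
        if p.2.contains cur && !(PySem.Set.contains vp.1 p.1) then
          (PySem.Set.add vp.1 p.1, vp.2 ++ [p.1])
        else vp) (v, q)
      = (v ++ pvNewsB items cur v, q ++ pvNewsB items cur v) := by
  induction items generalizing v q with
  | nil => simp [pvNewsB]
  | cons p ps ih =>
    simp only [List.foldl_cons, pvNewsB]
    by_cases hg : p.2.contains cur
    · by_cases hv : PySem.Set.contains v p.1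
      · have hc : (p.2.contains cur && !PySem.Set.contains v p.1) = false := by
          rw [hg, hv]; rfl
        rw [hc, if_neg Bool.false_ne_true, if_neg Bool.false_ne_true]
        exact ih v q
      · have hv' : PySem.Set.contains v p.1 = false := by
          revert hv; cases PySem.Set.contains v p.1 <;> simp
        have hc : (p.2.contains cur && !PySem.Set.contains v p.1) = true := by
          rw [hg, hv']; rfl
        have hadd : PySem.Set.add v p.1 = v ++ [p.1] := by
          simp only [PySem.Set.add]; rw [hv']; rfl
        rw [hc, if_pos rfl, if_pos rfl, hadd, ih]
        simp
    · have hg' : p.2.contains cur = false := by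
        revert hg; cases p.2.contains cur <;> simp
      have hc : (p.2.contains cur && !PySem.Set.contains v p.1) = false := by
        rw [hg']; rfl
      rw [hc, if_neg Bool.false_ne_true, if_neg Bool.false_ne_true]
      exact ih v q

-- B's inner `for caller, callees in graph.items():` scan as a helper
def pvStepB (items : List (String × List String)) (cur : String)
    (visited : PySem.Set String) (pending : List String) :
    PySem.Set String × List String :=
  items.foldl
    (fun (vp : PySem.Set String × List String) p =>
      if p.2.contains cur && !(PySem.Set.contains vp.1 p.1) then
        (PySem.Set.add vp.1 p.1, vp.2 ++ [p.1])
      else vp) (visited, pending)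

lemma pvStepB_eq (items : List (String × List String)) (cur : String)
    (v : PySem.Set String) (q : List String) :
    pvStepB items cur v q = (v ++ pvNewsB items cur v, q ++ pvNewsB items cur v) :=
  pvFoldB items cur v q

lemma pvNewsB_mem (items : List (String × List String)) (cur : String)
    (v : PySem.Set String) (x : String) (hx : x ∈ pvNewsB items cur v) :
    x ∈ items.map (·.1) ∧ x ∉ v := by
  induction items generalizing v with
  | nil => simp [pvNewsB] at hx
  | cons p ps ih =>
    rw [pvNewsB] at hx
    by_cases hg : p.2.contains cur
    · by_cases hv : PySem.Set.contains v p.1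
      · have hc : (p.2.contains cur && !PySem.Set.contains v p.1) = false := by
          rw [hg, hv]; rfl
        rw [hc, if_neg Bool.false_ne_true] at hx
        obtain ⟨h1, h2⟩ := ih v hx
        exact ⟨by simp only [List.map_cons]; exact List.mem_cons_of_mem _ h1, h2⟩
      · have hv' : PySem.Set.contains v p.1 = false := by
          revert hv; cases PySem.Set.contains v p.1 <;> simp
        have hc : (p.2.contains cur && !PySem.Set.contains v p.1) = true := by
          rw [hg, hv']; rfl
        have hadd : PySem.Set.add v p.1 = v ++ [p.1] := by
          simp only [PySem.Set.add]; rw [hv']; rfl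
        rw [hc, if_pos rfl] at hx
        rcases List.mem_cons.mp hx with rfl | hx'
        · exact ⟨by simp, by simpa using hv'⟩
        · obtain ⟨h1, h2⟩ := ih _ hx'
          rw [hadd] at h2
          exact ⟨by simp only [List.map_cons]; exact List.mem_cons_of_mem _ h1,
            fun hcc => h2 (List.mem_append_left _ hcc)⟩
    · have hg' : p.2.contains cur = false := by
        revert hg; cases p.2.contains cur <;> simp
      have hc : (p.2.contains cur && !PySem.Set.contains v p.1) = false := by
        rw [hg']; rfl
      rw [hc, if_neg Bool.false_ne_true] at hx
      obtain ⟨h1, h2⟩ := ih v hx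
      exact ⟨by simp only [List.map_cons]; exact List.mem_cons_of_mem _ h1, h2⟩

lemma pvGetD_mem_flatten (d : PySem.Dict String (List String)) (c x : String)
    (hx : x ∈ d.getD c []) : x ∈ d.values.flatten := by
  cases hg : d.get? c with
  | none =>
      rw [PySem.Dict.getD_eq_get?_getD, hg] at hx
      simp at hx
  | some w =>
      rw [PySem.Dict.getD_eq_get?_getD, hg] at hx
      simp only [Option.getD_some] at hx
      have hmem := PySem.Dict.mem_items_of_get?_eq_some (h := hg)
      have hw : w ∈ d.values := by
        simp only [PySem.Dict.values]
        exact List.mem_map_of_mem hmem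
      exact List.mem_flatten.mpr ⟨w, hw, hx⟩

lemma pvFilter_le (ks : List String) (p q : String → Bool)
    (h : ∀ x, p x = true → q x = true) :
    (ks.filter p).length ≤ (ks.filter q).length := by
  induction ks with
  | nil => simp
  | cons k ks ih =>
    cases hp : p k <;> cases hq : q k <;>
      simp [List.filter_cons, hp, hq] <;> try omega
    · exact absurd (h k hp) (by simp [hq])
    all_goals omega

lemma pvFilter_lt (ks : List String) (p q : String → Bool)
    (h : ∀ x, p x = true → q x = true)
    (x₀ : String) (hks : x₀ ∈ ks) (hq : q x₀ = true) (hp : p x₀ = false) :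
    (ks.filter p).length < (ks.filter q).length := by
  induction ks with
  | nil => simp at hks
  | cons k ks ih =>
    rcases List.mem_cons.mp hks with rfl | hks'
    · have := pvFilter_le ks p q h
      simp [List.filter_cons, hp, hq]
      omega
    · have := ih hks'
      cases hpk : p k <;> cases hqk : q k <;>
        simp [List.filter_cons, hpk, hqk] <;> try omega
      · exact absurd (h k hpk) (by simp [hqk])

def reverse_graph (graph : List (String × List String)) :
    PySem.Dict String (PySem.Set String) :=
  ((PySem.Dict.ofList graph).items).foldl
    (fun rev p =>
      p.2.foldl (fun rev callee =>
        rev.modify callee [] (fun s => PySem.Set.add s p.1)) rev)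
    PySem.Dict.empty

def pvBfsA (reverse : PySem.Dict String (PySem.Set String))
    (visited : PySem.Set String) (queue : List String) : PySem.Set String :=
  match queue with
  | [] => visited
  | current :: rest =>
      let vq := (reverse.getD current []).foldl
        (fun (vq : PySem.Set String × List String) caller =>
          if PySem.Set.contains vq.1 caller then vq
          else (PySem.Set.add vq.1 caller, vq.2 ++ [caller])) (visited, rest)
      pvBfsA reverse vq.1 vq.2
  termination_by
    (((reverse.values.flatten).filter (fun k => !(visited.contains k))).length,
      queue.length)
  decreasing_by
    simp only [dite_eq_ite]
    rw [pvFoldA]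
    cases hns : pvNews (reverse.getD current []) visited with
    | nil =>
        rw [List.append_nil, List.append_nil]
        refine Prod.Lex.right _ ?_
        simp
    | cons x ns' =>
        apply Prod.Lex.left
        have hx : x ∈ pvNews (reverse.getD current []) visited := by
          rw [hns]; exact List.mem_cons_self
        obtain ⟨hxL, hxv⟩ := pvNews_mem _ _ _ hx
        refine pvFilter_lt _ _ _ ?_ x (pvGetD_mem_flatten _ _ _ hxL) ?_ ?_
        · intro y hy
          have hy' : y ∉ visited ++ x :: ns' := by simpa using hy
          simpa using fun hc => hy' (List.mem_append_left _ hc)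
        · simpa using hxv
        · simp

def compute_repo_blast_radius (function_name : String)
    (graph : List (String × List String)) : List String :=
  pvBfsA (reverse_graph graph) PySem.Set.empty [function_name]

-- ===== PORT B =====
-- Python B: cursor-driven worklist; each popped node rescans graph.items() for its callers
def pvScanB (items : List (String × List String))
    (visited : PySem.Set String) (pending : List String) (i : Nat) : PySem.Set String :=
  if h : i < pending.length then
    let current := pending[i]
    pvScanB items (pvStepB items current visited pending).1
      (pvStepB items current visited pending).2 (i + 1)
  else visited
  termination_by
    (((items.map (·.1)).filter (fun k => !(visited.contains k))).length,
      pending.length - i)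
  decreasing_by
    rw [pvStepB_eq]
    cases hns : pvNewsB items pending[i] visited with
    | nil =>
        rw [List.append_nil, List.append_nil]
        refine Prod.Lex.right _ ?_
        show pending.length - (i + 1) < pending.length - i
        omega
    | cons x ns' =>
        apply Prod.Lex.left
        have hx : x ∈ pvNewsB items pending[i] visited := by
          rw [hns]; exact List.mem_cons_self
        obtain ⟨hxL, hxv⟩ := pvNewsB_mem _ _ _ _ hx
        refine pvFilter_lt _ _ _ ?_ x hxL ?_ ?_
        · intro y hy
          have hy' : y ∉ visited ++ x :: ns' := by simpa using hy
          simpa using fun hc => hy' (List.mem_append_left _ hc)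
        · simpa using hxv
        · simp

def compute_repo_blast_radius_alt (function_name : String)
    (graph : List (String × List String)) : List String :=
  pvScanB (PySem.Dict.ofList graph).items PySem.Set.empty [function_name] 0

-- ===== PRECONDITION & SPEC =====
def Spec_compute_repo_blast_radius (function_name : String) (graph : List (String × List String)) (out : List String) : Prop := out = compute_repo_blast_radius_alt function_name graph
instance (function_name : String) (graph : List (String × List String)) (out : List String) : Decidable (Spec_compute_repo_blast_radius function_name graph out) := by unfold Spec_compute_repo_blast_radius; infer_instance

-- ===== CLAIM (what is proved, stated in full; the proofs are below) =====
def Claim_equal_compute_repo_blast_radius : Prop := ∀ (function_name : String) (graph : List (String × List String)), Dom_compute_repo_blast_radius function_name graph → Spec_compute_repo_blast_radius function_name graph (compute_repo_blast_radius function_name graph)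

-- ===== LEMMAS AND PROOFS =====

-- adding an element twice is adding it once
lemma pvAdd_idem (s : PySem.Set String) (x : String) :
    PySem.Set.add (PySem.Set.add s x) x = PySem.Set.add s x := by
  by_cases h : x ∈ s
  · simp [PySem.Set.add, PySem.Set.contains, h]
  · simp [PySem.Set.add, PySem.Set.contains, h]

-- effect of A's inner `for callee in callees:` loop on one reverse entry
lemma pvRC1 (callees : List String) (rev : PySem.Dict String (PySem.Set String))
    (caller c : String) :
    (callees.foldl (fun rev callee =>
        rev.modify callee [] (fun s => PySem.Set.add s caller)) rev).getD c []
    = if callees.contains c then PySem.Set.add (rev.getD c []) caller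
      else rev.getD c [] := by
  induction callees generalizing rev with
  | nil => simp
  | cons e es ih =>
    simp only [List.foldl_cons, ih, PySem.Dict.getD_modify, List.contains_cons]
    by_cases hc : c = e
    · subst hc
      by_cases he : es.contains c <;> split_ifs <;> simp_all [pvAdd_idem]
    · by_cases he : es.contains c <;> split_ifs <;> simp_all [Ne.symm hc]

-- the whole reverse_graph fold, one graph entry at a time
lemma pvRC2 (items : List (String × List String))
    (rev : PySem.Dict String (PySem.Set String)) (c : String) :
    ((items.foldl
        (fun rev p =>
          p.2.foldl (fun rev callee =>
            rev.modify callee [] (fun s => PySem.Set.add s p.1)) rev) rev).getD c [])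
    = items.foldl (fun acc p =>
        if p.2.contains c then PySem.Set.add acc p.1 else acc) (rev.getD c []) := by
  induction items generalizing rev with
  | nil => simp
  | cons p ps ih =>
    simp only [List.foldl_cons]
    rw [ih, pvRC1]

-- with distinct callers and a disjoint accumulator the adds are plain appends
lemma pvRC3 (items : List (String × List String)) (c : String)
    (acc : PySem.Set String) (hnd : (items.map (·.1)).Nodup)
    (hdisj : ∀ p ∈ items, p.1 ∉ acc) :
    items.foldl (fun acc p =>
        if p.2.contains c then PySem.Set.add acc p.1 else acc) acc
    = acc ++ (items.filter (fun p => p.2.contains c)).map (·.1) := by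
  revert hnd hdisj
  induction items generalizing acc with
  | nil => intro _ _; simp
  | cons p ps ih =>
    intro hnd hdisj
    simp only [List.map_cons, List.nodup_cons] at hnd
    simp only [List.foldl_cons]
    by_cases h : p.2.contains c
    · have hacc : p.1 ∉ acc := hdisj p List.mem_cons_self
      have hacc' : PySem.Set.contains acc p.1 = false := by simpa using hacc
      have hadd : PySem.Set.add acc p.1 = acc ++ [p.1] := by
        simp only [PySem.Set.add]; rw [hacc']; rfl
      have h' : c ∈ p.2 := by simpa using h
      rw [if_pos h, hadd, ih (acc ++ [p.1]) hnd.2 ?_]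
      · simp [List.filter_cons, h']
      · intro q hq
        have hne : q.1 ≠ p.1 := fun he => hnd.1 (he ▸ List.mem_map_of_mem hq)
        have hq' : q.1 ∉ acc := hdisj q (List.mem_cons_of_mem _ hq)
        simp [hq', hne]
    · have h' : c ∉ p.2 := by simpa using h
      rw [if_neg h, ih acc hnd.2 (fun q hq => hdisj q (List.mem_cons_of_mem _ hq))]
      simp [List.filter_cons, h']

-- the reverse index looked up at c is exactly the scan of graph.items() that B performs
lemma pvRevChar (graph : List (String × List String)) (c : String) :
    (reverse_graph graph).getD c []
    = (((PySem.Dict.ofList graph).items).filter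
        (fun p => p.2.contains c)).map (·.1) := by
  have hnd : (((PySem.Dict.ofList graph).items).map (·.1)).Nodup := by
    have h := PySem.Dict.nodup_keys_ofList (ps := graph)
    simpa [PySem.Dict.keys] using h
  unfold reverse_graph
  rw [pvRC2, PySem.Dict.getD_empty, pvRC3 _ _ _ hnd (by intro p _; simp)]
  simp

-- B's scan discovers exactly what A's indexed lookup discovers
lemma pvBridge (items : List (String × List String)) (cur : String)
    (v : PySem.Set String) :
    pvNewsB items cur v
    = pvNews ((items.filter (fun p => p.2.contains cur)).map (·.1)) v := by
  induction items generalizing v with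
  | nil => simp [pvNewsB, pvNews]
  | cons p ps ih =>
    rw [pvNewsB]
    by_cases hg : p.2.contains cur
    · by_cases hv : PySem.Set.contains v p.1
      · have hc : (p.2.contains cur && !PySem.Set.contains v p.1) = false := by
          rw [hg, hv]; rfl
        rw [hc, if_neg Bool.false_ne_true]
        simp only [List.filter_cons]
        rw [if_pos hg, List.map_cons, pvNews, if_pos hv]
        exact ih v
      · have hv' : PySem.Set.contains v p.1 = false := by
          revert hv; cases PySem.Set.contains v p.1 <;> simp
        have hc : (p.2.contains cur && !PySem.Set.contains v p.1) = true := by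
          rw [hg, hv']; rfl
        rw [hc, if_pos rfl]
        simp only [List.filter_cons]
        rw [if_pos hg, List.map_cons, pvNews, if_neg hv, ih]
    · have hg' : p.2.contains cur = false := by
        revert hg; cases p.2.contains cur <;> simp
      have hc : (p.2.contains cur && !PySem.Set.contains v p.1) = false := by
        rw [hg']; rfl
      rw [hc, if_neg Bool.false_ne_true]
      simp only [List.filter_cons]
      rw [if_neg hg]
      exact ih v

-- main loop correspondence: A's queue is B's pending.drop i
lemma pvMain (graph : List (String × List String))
    (visited : PySem.Set String) (pending : List String) (i : Nat) :
    i ≤ pending.length →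
    pvBfsA (reverse_graph graph) visited (pending.drop i)
    = pvScanB (PySem.Dict.ofList graph).items visited pending i := by
  induction visited, pending, i
    using pvScanB.induct ((PySem.Dict.ofList graph).items) with
  | case1 visited pending i h current ih =>
    intro _
    rw [pvStepB_eq] at ih
    rw [List.drop_eq_getElem_cons h, pvBfsA]
    simp only [pvFoldA]
    rw [pvRevChar, ← pvBridge]
    rw [pvScanB, dif_pos h]
    simp only [pvStepB_eq]
    rw [List.drop_append_of_le_length (by omega)] at ih
    exact ih (by rw [List.length_append]; omega)
  | case2 visited pending i h =>
    intro hle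
    rw [List.drop_of_length_le (by omega), pvBfsA, pvScanB, dif_neg h]

-- ===== VERDICT (by name: the statement is the Claim_ definition above) =====
theorem compute_repo_blast_radius_spec : Claim_equal_compute_repo_blast_radius := by
  intro fn graph _
  unfold Spec_compute_repo_blast_radius compute_repo_blast_radius compute_repo_blast_radius_alt
  exact pvMain graph PySem.Set.empty [fn] 0 (by simp)
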